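-- pv_equiv track=rewrite | github.com/Balut-moko/procon-grassmaker-archive | atcoder/arc175/arc175_b/51713484.py | check
-- ===== SOURCE A (Python) =====
-- def check(s):
--     mn = 0
--     cnt = 0
--     for c in s:
--         if c == "(":
--             cnt += 1
--         else:
--             cnt -= 1
--         mn = min(mn, cnt)
--     return mn, cnt
-- ===== SOURCE B (Python) =====
-- def check(s):
--     pref = [0]
--     for c in s:
--         pref.append(pref[-1] + (1 if c == "(" else -1))
--     return min(pref), pref[-1]
-- ===== Notes on version B (the rewrite author's own statement) =====
-- stated objective: alternative
-- what changed: B first materialises the full prefix-balance table seeded with 0, then answers with two separate reductions (min over the table, its last element) instead of A's single fused loop maintaining a running minimum and counter.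
import Mathlib
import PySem

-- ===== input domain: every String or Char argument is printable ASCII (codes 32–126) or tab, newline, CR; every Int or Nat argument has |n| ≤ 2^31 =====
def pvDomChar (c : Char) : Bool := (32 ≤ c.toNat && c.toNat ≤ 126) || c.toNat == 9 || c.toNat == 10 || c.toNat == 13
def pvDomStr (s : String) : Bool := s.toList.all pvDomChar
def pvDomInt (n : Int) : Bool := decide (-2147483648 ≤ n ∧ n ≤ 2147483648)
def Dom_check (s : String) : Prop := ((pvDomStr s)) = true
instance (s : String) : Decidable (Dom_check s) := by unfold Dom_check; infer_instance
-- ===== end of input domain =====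

-- B builds the full 0-seeded prefix-balance table and reduces it twice (min, last) instead of A's fused running-min loop; same cost, different decomposition.


-- ===== PORT A =====
def check (s : String) : Int × Int :=
  s.toList.foldl (fun (p : Int × Int) c =>
    let cnt := if c = '(' then p.2 + 1 else p.2 - 1
    (min p.1 cnt, cnt)) (0, 0)

-- ===== PORT B =====
-- the table: pref = [0]; for c in s: pref.append(pref[-1] + (1 if c == "(" else -1))
def prefTable (s : String) : List Int :=
  s.toList.foldl (fun (pr : List Int) c =>
    pr ++ [PySem.List.pyGetD pr (-1) 0 + (if c = '(' then 1 else -1)]) [(0 : Int)]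

-- min(pref) is ported as (min? pref id).getD 0; pref is never empty (it starts as [0]), so the default is never consulted, exactly as Python's min cannot raise here.
def check_alt (s : String) : Int × Int :=
  ((PySem.List.min? (prefTable s) (fun x => x)).getD 0,
   PySem.List.pyGetD (prefTable s) (-1) 0)

-- ===== PRECONDITION & SPEC =====
def Spec_check (s : String) (out : Int × Int) : Prop := out = check_alt s
instance (s : String) (out : Int × Int) : Decidable (Spec_check s out) := by unfold Spec_check; infer_instance

-- ===== CLAIM (what is proved, stated in full; the proofs are below) =====
def Claim_equal_check : Prop := ∀ (s : String), Dom_check s → Spec_check s (check s)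

-- ===== LEMMAS AND PROOFS =====

/-- The list of running balances produced after starting counter `cnt`. -/
def prefs (cnt : Int) : List Char → List Int
  | [] => []
  | c :: t =>
    let cnt' := cnt + (if c = '(' then 1 else -1)
    cnt' :: prefs cnt' t

theorem lastD_cons (x y : Int) (t : List Int) :
    (y :: t).getLastD x = t.getLastD y := by
  cases t <;> simp [List.getLastD]

theorem checkA_fold (l : List Char) (mn cnt : Int) :
    l.foldl (fun (p : Int × Int) c =>
      let cnt := if c = '(' then p.2 + 1 else p.2 - 1
      (min p.1 cnt, cnt)) (mn, cnt)
    = ((prefs cnt l).foldl min mn, (prefs cnt l).getLastD cnt) := by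
  induction l generalizing mn cnt with
  | nil => simp [prefs]
  | cons c t ih =>
    have hd : (if c = '(' then cnt + 1 else cnt - 1)
        = cnt + (if c = '(' then 1 else -1) := by
      by_cases h : c = '(' <;> simp [h, sub_eq_add_neg]
    simp only [List.foldl_cons, prefs]
    rw [hd, ih, lastD_cons]

theorem checkB_fold (l : List Char) (acc : List Int) (cnt : Int) :
    l.foldl (fun (pr : List Int) c =>
      pr ++ [PySem.List.pyGetD pr (-1) 0 + (if c = '(' then 1 else -1)]) (acc ++ [cnt])
    = acc ++ cnt :: prefs cnt l := by
  induction l generalizing acc cnt with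
  | nil => simp [prefs]
  | cons c t ih =>
    simp only [List.foldl_cons, PySem.List.pyGetD_neg_one_append_singleton]
    rw [show acc ++ [cnt] ++ [cnt + (if c = '(' then 1 else -1)]
          = (acc ++ [cnt]) ++ [cnt + (if c = '(' then 1 else -1)] by simp,
        ih]
    simp [prefs]

theorem prefTable_eq (s : String) : prefTable s = 0 :: prefs 0 s.toList := by
  have h := checkB_fold s.toList [] 0
  simpa [prefTable] using h

theorem pyGetD_neg_one_cons (x : Int) (l : List Int) :
    PySem.List.pyGetD (x :: l) (-1) 0 = l.getLastD x := by
  rw [PySem.List.pyGetD_neg_one (x :: l) 0 (by simp)]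
  induction l generalizing x with
  | nil => simp
  | cons y t ih => rw [List.getLast_cons (by simp), ih y, lastD_cons]

-- ===== VERDICT (by name: the statement is the Claim_ definition above) =====
theorem check_spec : Claim_equal_check := by
  intro s _
  unfold Spec_check check check_alt
  rw [prefTable_eq, checkA_fold, pyGetD_neg_one_cons, PySem.List.min?_id_cons]
  simp
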